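-- pv_equiv track=rewrite | github.com/antoinelemor/Transcribe-tool | transcribe_tool/utils/text_tokenization.py | _merge_lowercase_fragments
-- ===== SOURCE A (Python) =====
-- from typing import List, Optional, Dict, Any, Set
--
-- def _merge_lowercase_fragments(sentences: List[str]) -> List[str]:
--     """Merge sentence fragments that start with lowercase."""
--     if not sentences or len(sentences) < 2:
--         return sentences
--
--     merged = []
--     i = 0
--
--     while i < len(sentences):
--         current = sentences[i]
--
--         while i + 1 < len(sentences):
--             next_sent = sentences[i + 1].strip()
--             if next_sent and next_sent[0].islower():
--                 current = current.rstrip() + ' ' + next_sent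
--                 i += 1
--             else:
--                 break
--
--         merged.append(current)
--         i += 1
--
--     return merged
-- ===== SOURCE B (Python) =====
-- def _merge_lowercase_fragments(sentences):
--     """Merge sentence fragments that start with lowercase (look-back variant)."""
--     if not sentences or len(sentences) < 2:
--         return sentences
--     merged = []
--     for s in sentences:
--         t = s.strip()
--         if merged and t and t[0].islower():
--             merged[-1] = merged[-1].rstrip() + ' ' + t
--         else:
--             merged.append(s)
--     return merged
-- ===== Notes on version B (the rewrite author's own statement) =====
-- stated objective: simpler
-- what changed: Replaced A's index-bumping outer while with a look-ahead inner while by a single for-loop that merges a lowercase fragment into the previous group in place (look-back instead of look-ahead).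
import Mathlib
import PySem

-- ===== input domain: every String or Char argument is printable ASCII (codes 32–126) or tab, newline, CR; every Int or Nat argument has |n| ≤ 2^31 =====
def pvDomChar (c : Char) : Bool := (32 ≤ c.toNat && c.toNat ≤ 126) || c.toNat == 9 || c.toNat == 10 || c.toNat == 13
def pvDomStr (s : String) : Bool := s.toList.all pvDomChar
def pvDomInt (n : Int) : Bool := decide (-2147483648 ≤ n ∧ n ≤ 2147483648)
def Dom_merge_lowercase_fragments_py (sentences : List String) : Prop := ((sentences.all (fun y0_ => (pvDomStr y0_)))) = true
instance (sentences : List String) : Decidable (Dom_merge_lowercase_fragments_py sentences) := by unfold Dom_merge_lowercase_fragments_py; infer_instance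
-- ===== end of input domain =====

-- B replaces A's index-bumping look-ahead inner while with a single look-back pass
-- (merge into the previous group); objective: simpler.

-- ===== PORT A =====
-- outer while over the remaining sentences; the merging branch of the inner while
-- is the recursive call that extends `current`, the `break` is the else branch.
def mergeLoopA (current : String) (rest : List String) : List String :=
  match rest with
  | [] => [current]
  | n :: rs =>
    let t := PySem.Str.strip n
    if t.toList ≠ [] ∧ PySem.Chars.islower (t.toList.headD ' ') then
      mergeLoopA (PySem.Str.rstrip current ++ " " ++ t) rs
    else
      current :: mergeLoopA n rs

def merge_lowercase_fragments_py (sentences : List String) : List String :=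
  if sentences.length < 2 then sentences
  else
    match sentences with
    | [] => []
    | s :: rest => mergeLoopA s rest

-- ===== PORT B =====
-- one step of B's `for s in sentences` look-back loop.
def mergeStepB (merged : List String) (s : String) : List String :=
  let t := PySem.Str.strip s
  if merged ≠ [] ∧ t.toList ≠ [] ∧ PySem.Chars.islower (t.toList.headD ' ') then
    merged.dropLast ++ [PySem.Str.rstrip (PySem.List.pyGetD merged (-1) "") ++ " " ++ t]
  else
    merged ++ [s]

def merge_lowercase_fragments_py_alt (sentences : List String) : List String :=
  if sentences.length < 2 then sentences
  else sentences.foldl mergeStepB []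

-- ===== PRECONDITION & SPEC =====
def Spec_merge_lowercase_fragments_py (sentences : List String) (out : List String) : Prop := out = merge_lowercase_fragments_py_alt sentences
instance (sentences : List String) (out : List String) : Decidable (Spec_merge_lowercase_fragments_py sentences out) := by unfold Spec_merge_lowercase_fragments_py; infer_instance

-- ===== CLAIM (what is proved, stated in full; the proofs are below) =====
def Claim_equal_merge_lowercase_fragments_py : Prop := ∀ (sentences : List String), Dom_merge_lowercase_fragments_py sentences → Spec_merge_lowercase_fragments_py sentences (merge_lowercase_fragments_py sentences)

-- ===== LEMMAS AND PROOFS =====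

-- B's fold, started on a non-empty accumulator `pre ++ [current]`, computes A's loop.
theorem foldl_mergeStepB_eq (rest : List String) :
    ∀ (pre : List String) (current : String),
      List.foldl mergeStepB (pre ++ [current]) rest = pre ++ mergeLoopA current rest := by
  induction rest with
  | nil => intro pre current; simp [mergeLoopA]
  | cons n rs ih =>
    intro pre current
    simp only [List.foldl_cons, mergeLoopA, mergeStepB]
    by_cases h : (PySem.Str.strip n).toList ≠ [] ∧ PySem.Chars.islower ((PySem.Str.strip n).toList.headD ' ')
    · have hne : pre ++ [current] ≠ [] := by simp
      rw [if_pos ⟨hne, h⟩, if_pos h]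
      rw [PySem.List.pyGetD_neg_one_append_singleton]
      simp only [List.dropLast_concat]
      exact ih pre _
    · have : ¬ (pre ++ [current] ≠ [] ∧ (PySem.Str.strip n).toList ≠ [] ∧
          PySem.Chars.islower ((PySem.Str.strip n).toList.headD ' ')) := by
        intro hc; exact h hc.2
      rw [if_neg this, if_neg h]
      have := ih (pre ++ [current]) n
      simpa using this

-- ===== VERDICT (by name: the statement is the Claim_ definition above) =====
theorem merge_lowercase_fragments_py_spec : Claim_equal_merge_lowercase_fragments_py := by
  intro sentences _
  unfold Spec_merge_lowercase_fragments_py merge_lowercase_fragments_py merge_lowercase_fragments_py_alt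
  by_cases hlen : sentences.length < 2
  · simp [hlen]
  · rw [if_neg hlen, if_neg hlen]
    match sentences with
    | [] => simp at hlen
    | s :: rest =>
      have h0 : mergeStepB [] s = [s] := by simp [mergeStepB]
      rw [List.foldl_cons, h0]
      have := foldl_mergeStepB_eq rest [] s
      simpa using this.symm
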